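-- pv_equiv track=rewrite | github.com/Magaav/hermes-orchestrator | plugins/public/discord/hooks/discord_slash_bridge/handlers.py | _parse_csv_commands
-- ===== SOURCE A (Python) =====
-- from typing import Any, Dict, Optional, Tuple
--
-- def _parse_csv_tokens(raw: Any) -> list[str]:
--     if raw is None:
--         return []
--     if isinstance(raw, list):
--         values = raw
--     else:
--         values = str(raw or "").split(",")
--
--     out: list[str] = []
--     seen: set[str] = set()
--     for item in values:
--         token = str(item or "").strip()
--         if not token:
--             continue
--         if token in seen:
--             continue
--         seen.add(token)
--         out.append(token)
--     return out
--
-- def _parse_csv_commands(raw: Any) -> list[str]: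
--     out: list[str] = []
--     seen: set[str] = set()
--     for token in _parse_csv_tokens(raw):
--         cmd = str(token).strip().lower().lstrip("/")
--         if not cmd or cmd in seen:
--             continue
--         seen.add(cmd)
--         out.append(cmd)
--     return out
-- ===== SOURCE B (Python) =====
-- def _parse_csv_commands(raw):
--     if raw is None:
--         values = []
--     elif isinstance(raw, list):
--         values = raw
--     else:
--         values = str(raw or "").split(",")
--     out = []
--     seen = set()
--     for item in values:
--         token = str(item or "").strip()
--         if not token:
--             continue
--         cmd = token.lower().lstrip("/")
--         if not cmd or cmd in seen:
--             continue
--         seen.add(cmd)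
--         out.append(cmd)
--     return out
-- ===== Notes on version B (the rewrite author's own statement) =====
-- stated objective: simpler
-- what changed: B replaces A's two-phase pipeline (a first loop deduplicating raw tokens into an intermediate list, then a second loop normalizing and deduplicating commands) with a single loop over the split values that maintains one seen-set of normalized commands and appends directly.
import Mathlib
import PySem

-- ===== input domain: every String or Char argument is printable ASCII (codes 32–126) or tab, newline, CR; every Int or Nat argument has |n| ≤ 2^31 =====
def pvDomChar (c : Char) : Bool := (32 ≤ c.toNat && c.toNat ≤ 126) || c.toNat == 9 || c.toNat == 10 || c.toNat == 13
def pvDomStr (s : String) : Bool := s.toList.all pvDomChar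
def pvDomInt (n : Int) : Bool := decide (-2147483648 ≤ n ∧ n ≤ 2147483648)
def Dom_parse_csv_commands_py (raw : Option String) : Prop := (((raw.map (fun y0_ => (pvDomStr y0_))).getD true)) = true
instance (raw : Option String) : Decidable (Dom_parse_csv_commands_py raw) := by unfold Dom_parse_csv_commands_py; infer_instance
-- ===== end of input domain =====

-- B fuses A's two dedup passes (token dedup, then command dedup) into a single loop with one
-- `seen` set; same return value, simpler one-pass decomposition.

-- ===== PORT A =====
-- str.lstrip("/") for the single strip character '/': drop leading '/' characters (exact).
def pvLstripSlash (s : String) : String := String.ofList (s.toList.dropWhile (· == '/'))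

-- one iteration of the loop in _parse_csv_tokens (state = (out, seen))
def pvTokStep (st : List String × PySem.Set String) (item : String) : List String × PySem.Set String :=
  let token := PySem.Str.strip item
  if token = "" then st
  else if token ∈ st.2 then st
  else (st.1 ++ [token], st.2.add token)

-- _parse_csv_tokens restricted to raw : Optional[str] (the list branch cannot arise);
-- `str(raw or "")` is `raw` itself for a str, and split? with the nonempty separator "," is `some`.
def pvParseCsvTokens (raw : Option String) : List String :=
  match raw with
  | none => []
  | some s =>
    let values := (PySem.Str.split? s ",").getD []
    (values.foldl pvTokStep ([], PySem.Set.ofList [])).1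

-- one iteration of the loop in _parse_csv_commands
def pvCmdStep (st : List String × PySem.Set String) (token : String) : List String × PySem.Set String :=
  let cmd := pvLstripSlash (PySem.Str.lower (PySem.Str.strip token))
  if cmd = "" ∨ cmd ∈ st.2 then st
  else (st.1 ++ [cmd], st.2.add cmd)

def parse_csv_commands_py (raw : Option String) : List String :=
  ((pvParseCsvTokens raw).foldl pvCmdStep ([], PySem.Set.ofList [])).1

-- ===== PORT B =====
-- one iteration of B's single fused loop
def pvFusedStep (st : List String × PySem.Set String) (item : String) : List String × PySem.Set String :=
  let token := PySem.Str.strip item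
  if token = "" then st
  else
    let cmd := pvLstripSlash (PySem.Str.lower token)
    if cmd = "" ∨ cmd ∈ st.2 then st
    else (st.1 ++ [cmd], st.2.add cmd)

def parse_csv_commands_py_alt (raw : Option String) : List String :=
  let values := match raw with
    | none => []
    | some s => (PySem.Str.split? s ",").getD []
  (values.foldl pvFusedStep ([], PySem.Set.ofList [])).1

-- ===== PRECONDITION & SPEC =====
def Spec_parse_csv_commands_py (raw : Option String) (out : List String) : Prop := out = parse_csv_commands_py_alt raw
instance (raw : Option String) (out : List String) : Decidable (Spec_parse_csv_commands_py raw out) := by unfold Spec_parse_csv_commands_py; infer_instance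

-- ===== CLAIM (what is proved, stated in full; the proofs are below) =====
def Claim_equal_parse_csv_commands_py : Prop := ∀ (raw : Option String), Dom_parse_csv_commands_py raw → Spec_parse_csv_commands_py raw (parse_csv_commands_py raw)

-- ===== LEMMAS AND PROOFS =====

-- pure (list-of-seen) versions of the three loops, for the induction
def pvATok (seen : List String) : List String → List String
  | [] => []
  | v :: vs =>
    let t := PySem.Str.strip v
    if t = "" then pvATok seen vs
    else if t ∈ seen then pvATok seen vs
    else t :: pvATok (t :: seen) vs

def pvACmd (seen : List String) : List String → List String
  | [] => []
  | t :: ts =>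
    let c := pvLstripSlash (PySem.Str.lower (PySem.Str.strip t))
    if c = "" ∨ c ∈ seen then pvACmd seen ts
    else c :: pvACmd (c :: seen) ts

def pvBFused (seen : List String) : List String → List String
  | [] => []
  | v :: vs =>
    let t := PySem.Str.strip v
    if t = "" then pvBFused seen vs
    else
      let c := pvLstripSlash (PySem.Str.lower t)
      if c = "" ∨ c ∈ seen then pvBFused seen vs
      else c :: pvBFused (c :: seen) vs

-- Python str.strip() is idempotent
lemma pv_dropWhile_prefix_fix (p : Char → Bool) (l t : List Char)
    (hl : l.dropWhile p = l) (ht : t <+: l) : t.dropWhile p = t := by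
  cases t with
  | nil => simp
  | cons a t' =>
    obtain ⟨r, hr⟩ := ht
    have ha : p a = false := by
      by_contra hpa
      have hpa' : p a = true := by simpa using hpa
      have h2 := hl
      rw [← hr, List.cons_append, List.dropWhile_cons, if_pos hpa'] at h2
      have h3 := congrArg List.length h2
      have h4 := List.length_dropWhile_le p (t' ++ r)
      simp only [List.length_cons, List.length_append] at h3 h4
      omega
    rw [List.dropWhile_cons, if_neg (by simp [ha])]

lemma pv_strip_idem (s : String) : PySem.Str.strip (PySem.Str.strip s) = PySem.Str.strip s := by
  simp only [PySem.Str.strip, String.toList_ofList, PySem.Chars.strip, PySem.Chars.rstrip,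
    PySem.Chars.lstrip]
  set p := PySem.Chars.isspace
  set u := s.toList.dropWhile p with hu
  have hufix : u.dropWhile p = u := List.dropWhile_idempotent p s.toList
  have hpre : (u.reverse.dropWhile p).reverse <+: u := by
    have : u.reverse.dropWhile p <:+ u.reverse := List.dropWhile_suffix p
    simpa using this.reverse
  rw [pv_dropWhile_prefix_fix p u _ hufix hpre]
  rw [List.reverse_reverse, List.dropWhile_idempotent]

-- fold-to-pure lemmas (membership-equivalent seen sets give the same output list)
lemma pvTok_fold (values : List String) : ∀ (acc : List String) (s : PySem.Set String)
    (seen : List String), (∀ x, x ∈ s ↔ x ∈ seen) →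
    (values.foldl pvTokStep (acc, s)).1 = acc ++ pvATok seen values := by
  induction values with
  | nil => intro acc s seen _; simp [pvATok]
  | cons v vs ih =>
    intro acc s seen hmem
    simp only [List.foldl_cons, pvTokStep, pvATok]
    by_cases h0 : PySem.Str.strip v = ""
    · simp only [h0, if_pos]
      exact ih acc s seen hmem
    · rw [if_neg h0, if_neg h0]
      by_cases h1 : PySem.Str.strip v ∈ seen
      · rw [if_pos ((hmem _).2 h1), if_pos h1]
        exact ih acc s seen hmem
      · rw [if_neg (fun h => h1 ((hmem _).1 h)), if_neg h1]
        rw [ih (acc ++ [PySem.Str.strip v]) (s.add (PySem.Str.strip v)) (PySem.Str.strip v :: seen)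
          (by intro x; rw [PySem.Set.mem_add]; simp [hmem x, or_comm])]
        simp

lemma pvCmd_fold (ts : List String) : ∀ (acc : List String) (s : PySem.Set String)
    (seen : List String), (∀ x, x ∈ s ↔ x ∈ seen) →
    (ts.foldl pvCmdStep (acc, s)).1 = acc ++ pvACmd seen ts := by
  induction ts with
  | nil => intro acc s seen _; simp [pvACmd]
  | cons t ts ih =>
    intro acc s seen hmem
    simp only [List.foldl_cons, pvCmdStep, pvACmd]
    set c := pvLstripSlash (PySem.Str.lower (PySem.Str.strip t)) with hc
    by_cases h1 : c = "" ∨ c ∈ seen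
    · rw [if_pos (h1.imp_right (hmem _).2), if_pos h1]
      exact ih acc s seen hmem
    · rw [if_neg (fun h => h1 (h.imp_right (hmem _).1)), if_neg h1]
      rw [ih (acc ++ [c]) (s.add c) (c :: seen)
        (by intro x; rw [PySem.Set.mem_add]; simp [hmem x, or_comm])]
      simp

lemma pvFused_fold (values : List String) : ∀ (acc : List String) (s : PySem.Set String)
    (seen : List String), (∀ x, x ∈ s ↔ x ∈ seen) →
    (values.foldl pvFusedStep (acc, s)).1 = acc ++ pvBFused seen values := by
  induction values with
  | nil => intro acc s seen _; simp [pvBFused]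
  | cons v vs ih =>
    intro acc s seen hmem
    simp only [List.foldl_cons, pvFusedStep, pvBFused]
    by_cases h0 : PySem.Str.strip v = ""
    · simp only [h0, if_pos]
      exact ih acc s seen hmem
    · rw [if_neg h0, if_neg h0]
      set c := pvLstripSlash (PySem.Str.lower (PySem.Str.strip v)) with hc
      by_cases h1 : c = "" ∨ c ∈ seen
      · rw [if_pos (h1.imp_right (hmem _).2), if_pos h1]
        exact ih acc s seen hmem
      · rw [if_neg (fun h => h1 (h.imp_right (hmem _).1)), if_neg h1]
        rw [ih (acc ++ [c]) (s.add c) (c :: seen)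
          (by intro x; rw [PySem.Set.mem_add]; simp [hmem x, or_comm])]
        simp

-- core: A's command pass over A's deduped token list = B's fused pass, given that every
-- token already in seenT maps to a command that is empty or already in seenC
lemma pv_core (values : List String) : ∀ (seenT seenC : List String),
    (∀ t ∈ seenT, pvLstripSlash (PySem.Str.lower t) = "" ∨ pvLstripSlash (PySem.Str.lower t) ∈ seenC) →
    pvACmd seenC (pvATok seenT values) = pvBFused seenC values := by
  induction values with
  | nil => intro _ _ _; simp [pvATok, pvACmd, pvBFused]
  | cons v vs ih =>
    intro seenT seenC H
    simp only [pvATok, pvBFused]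
    by_cases h0 : PySem.Str.strip v = ""
    · simp only [h0, if_pos]
      exact ih seenT seenC H
    · rw [if_neg h0, if_neg h0]
      set t := PySem.Str.strip v with ht
      have hcmd : pvLstripSlash (PySem.Str.lower (PySem.Str.strip t)) = pvLstripSlash (PySem.Str.lower t) := by
        rw [ht, pv_strip_idem]
      set c := pvLstripSlash (PySem.Str.lower t) with hc
      by_cases h1 : t ∈ seenT
      · rw [if_pos h1]
        have hC : c = "" ∨ c ∈ seenC := H t h1
        rw [ih seenT seenC H]
        by_cases h2 : c = "" ∨ c ∈ seenC
        · rw [if_pos h2]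
        · exact absurd hC h2
      · rw [if_neg h1]
        simp only [pvACmd, hcmd]
        by_cases h2 : c = "" ∨ c ∈ seenC
        · rw [if_pos h2, if_pos h2]
          exact ih (t :: seenT) seenC (by
            intro x hx
            rcases List.mem_cons.1 hx with rfl | hx
            · exact h2
            · exact H x hx)
        · rw [if_neg h2, if_neg h2]
          rw [ih (t :: seenT) (c :: seenC) (by
            intro x hx
            rcases List.mem_cons.1 hx with rfl | hx
            · right; exact List.mem_cons_self
            · exact (H x hx).imp_right (fun h => List.mem_cons_of_mem _ h))]

-- ===== VERDICT (by name: the statement is the Claim_ definition above) =====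
theorem parse_csv_commands_py_spec : Claim_equal_parse_csv_commands_py := by
  intro raw _
  show parse_csv_commands_py raw = parse_csv_commands_py_alt raw
  unfold parse_csv_commands_py parse_csv_commands_py_alt pvParseCsvTokens
  cases raw with
  | none =>
    simp
  | some s =>
    simp only
    rw [pvTok_fold _ [] (PySem.Set.ofList []) [] (by simp),
        pvFused_fold _ [] (PySem.Set.ofList []) [] (by simp),
        pvCmd_fold _ [] (PySem.Set.ofList []) [] (by simp)]
    simp only [List.nil_append]
    exact pv_core _ [] [] (by simp)
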